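-- pv_equiv track=rewrite | github.com/pypi-data/pypi-mirror-186 | packages/miniapp/miniapp-0.1.1.tar.gz/miniapp-0.1.1/miniapp/api/base.py | _compile_permissions
-- ===== SOURCE A (Python) =====
-- def _compile_permissions(role_perms: dict, role_names: list):
--     """
--     Permissions are cumulative - higher roles have all permissions of lower roles.  We are supplied with the
--     permissions unique to each role, but we need to store a complete list of permissions available to each role.
--     """
--     out = {}
--     accum = set()
--     role_perms = role_perms or {}
--     for role in role_names:
--         perms = role_perms.get(role, [])
--         accum |= set(perms)
--         out[role] = list(sorted(accum))
--     return out
-- ===== SOURCE B (Python) =====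
-- def _compile_permissions(role_perms: dict, role_names: list):
--     """Same result as A, but keeps one sorted duplicate-free accumulator and
--     inserts only the new permissions of each role at their sorted position,
--     instead of rebuilding a set and re-sorting it for every role."""
--     out = {}
--     accum = []  # sorted, duplicate-free list of all permissions seen so far
--     role_perms = role_perms or {}
--     for role in role_names:
--         for p in role_perms.get(role, []):
--             i = 0
--             while i < len(accum) and accum[i] < p:
--                 i += 1
--             if i == len(accum) or accum[i] != p:
--                 accum.insert(i, p)
--         out[role] = list(accum)
--     return out
-- ===== Notes on version B (the rewrite author's own statement) =====
-- stated objective: alternative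
-- what changed: B replaces A's per-role set-union plus full re-sort with a single sorted duplicate-free accumulator into which only each role's new permissions are inserted at their sorted position.
import Mathlib
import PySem

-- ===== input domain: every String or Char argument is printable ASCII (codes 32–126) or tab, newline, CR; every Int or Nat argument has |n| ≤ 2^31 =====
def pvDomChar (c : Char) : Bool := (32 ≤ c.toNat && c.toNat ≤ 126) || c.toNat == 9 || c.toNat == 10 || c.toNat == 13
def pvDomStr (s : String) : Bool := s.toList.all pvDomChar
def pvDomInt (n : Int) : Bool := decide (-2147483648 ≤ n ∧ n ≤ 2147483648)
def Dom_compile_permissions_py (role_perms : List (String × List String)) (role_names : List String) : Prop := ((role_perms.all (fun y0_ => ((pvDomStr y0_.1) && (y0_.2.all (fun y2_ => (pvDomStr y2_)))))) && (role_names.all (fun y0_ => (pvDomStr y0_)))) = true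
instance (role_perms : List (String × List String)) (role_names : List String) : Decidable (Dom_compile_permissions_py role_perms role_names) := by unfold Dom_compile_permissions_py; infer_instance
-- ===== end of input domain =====

-- ===== PORT A =====
-- B changes: one sorted duplicate-free accumulator with in-place insertion of new
-- permissions instead of per-role set union + full re-sort (objective: alternative).
-- ('role_perms or {}' in A is the identity here: an empty dict/assoc list looks up the same.)
def compile_permissions_py (role_perms : List (String × List String)) (role_names : List String) : List (String × List String) :=
  (role_names.foldl
    (fun (st : PySem.Dict String (List String) × PySem.Set String) role =>
      let perms := (PySem.Dict.mk role_perms).getD role []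
      let accum := PySem.Set.union st.2 (PySem.Set.ofList perms)
      (st.1.insert role (PySem.List.sorted accum (fun x => x) false), accum))
    (PySem.Dict.empty, PySem.Set.empty)).1.items

-- ===== PORT B =====
-- scan for the first element not < p; insert p there unless already present (Source B's inner while loop)
def pvInsertSorted (accum : List String) (p : String) : List String :=
  match accum with
  | [] => [p]
  | x :: xs =>
    if x < p then x :: pvInsertSorted xs p
    else if x ≠ p then p :: x :: xs
    else x :: xs

def compile_permissions_py_alt (role_perms : List (String × List String)) (role_names : List String) : List (String × List String) :=
  (role_names.foldl
    (fun (st : PySem.Dict String (List String) × List String) role =>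
      let accum := ((PySem.Dict.mk role_perms).getD role []).foldl pvInsertSorted st.2
      (st.1.insert role accum, accum))
    (PySem.Dict.empty, ([] : List String))).1.items

-- ===== PRECONDITION & SPEC =====
def Spec_compile_permissions_py (role_perms : List (String × List String)) (role_names : List String) (out : List (String × List String)) : Prop := out = compile_permissions_py_alt role_perms role_names
instance (role_perms : List (String × List String)) (role_names : List String) (out : List (String × List String)) : Decidable (Spec_compile_permissions_py role_perms role_names out) := by unfold Spec_compile_permissions_py; infer_instance

-- ===== CLAIM (what is proved, stated in full; the proofs are below) =====
def Claim_equal_compile_permissions_py : Prop := ∀ (role_perms : List (String × List String)) (role_names : List String), Dom_compile_permissions_py role_perms role_names → Spec_compile_permissions_py role_perms role_names (compile_permissions_py role_perms role_names)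

-- ===== LEMMAS AND PROOFS =====

lemma mem_pvInsertSorted (l : List String) (p y : String) :
    y ∈ pvInsertSorted l p ↔ y = p ∨ y ∈ l := by
  induction l with
  | nil => simp [pvInsertSorted]
  | cons x xs ih =>
    simp only [pvInsertSorted]
    split_ifs with h1 h2
    · simp only [List.mem_cons, ih]; try tauto
    · simp only [List.mem_cons]; try tauto
    · have hx : x = p := not_not.mp h2
      subst hx; simp only [List.mem_cons]; try tauto

lemma pairwise_pvInsertSorted (l : List String) (p : String)
    (h : l.Pairwise (· < ·)) : (pvInsertSorted l p).Pairwise (· < ·) := by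
  induction l with
  | nil => simp [pvInsertSorted]
  | cons x xs ih =>
    rcases List.pairwise_cons.mp h with ⟨hx, hxs⟩
    simp only [pvInsertSorted]
    split_ifs with h1 h2
    · refine List.pairwise_cons.mpr ⟨?_, ih hxs⟩
      intro y hy
      rcases (mem_pvInsertSorted xs p y).mp hy with rfl | hy'
      · exact h1
      · exact hx y hy'
    · have hpx : p < x := lt_of_le_of_ne (not_lt.mp h1) (fun e => h2 e.symm)
      refine List.pairwise_cons.mpr ⟨?_, h⟩
      intro y hy
      rcases List.mem_cons.mp hy with rfl | hy'
      · exact hpx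
      · exact lt_trans hpx (hx y hy')
    · exact h

lemma foldl_pvInsertSorted_mem (perms : List String) (l : List String) (y : String) :
    y ∈ perms.foldl pvInsertSorted l ↔ y ∈ l ∨ y ∈ perms := by
  induction perms generalizing l with
  | nil => simp
  | cons p ps ih =>
    simp only [List.foldl_cons, ih, mem_pvInsertSorted, List.mem_cons]
    tauto

lemma foldl_pvInsertSorted_pairwise (perms : List String) (l : List String)
    (h : l.Pairwise (· < ·)) : (perms.foldl pvInsertSorted l).Pairwise (· < ·) := by
  induction perms generalizing l with
  | nil => exact h
  | cons p ps ih => exact ih _ (pairwise_pvInsertSorted l p h)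

-- new accumulator list = sorted(new accumulator set)
lemma accum_step (perms : List String) (s : PySem.Set String) (l : List String)
    (hs : s.Nodup) (hl : l.Pairwise (· < ·)) (hm : ∀ y, y ∈ l ↔ y ∈ s) :
    PySem.List.sorted (PySem.Set.union s (PySem.Set.ofList perms)) (fun x => x) false
      = perms.foldl pvInsertSorted l := by
  apply PySem.List.sorted_eq_of_perm_of_pairwise_lt
  · rw [List.perm_ext_iff_of_nodup
      ((foldl_pvInsertSorted_pairwise perms l hl).nodup)
      (PySem.Set.nodup_union s _ hs)]
    intro y
    rw [foldl_pvInsertSorted_mem, PySem.Set.mem_union, PySem.Set.mem_ofList, hm]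
  · exact foldl_pvInsertSorted_pairwise perms l hl

lemma fold_eq (role_perms : List (String × List String)) (names : List String)
    (dA dB : PySem.Dict String (List String)) (s : PySem.Set String) (l : List String)
    (hd : dA = dB) (hs : s.Nodup) (hl : l.Pairwise (· < ·)) (hm : ∀ y, y ∈ l ↔ y ∈ s) :
    (names.foldl
      (fun (st : PySem.Dict String (List String) × PySem.Set String) role =>
        let perms := (PySem.Dict.mk role_perms).getD role []
        let accum := PySem.Set.union st.2 (PySem.Set.ofList perms)
        (st.1.insert role (PySem.List.sorted accum (fun x => x) false), accum)) (dA, s)).1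
    = (names.foldl
      (fun (st : PySem.Dict String (List String) × List String) role =>
        let accum := ((PySem.Dict.mk role_perms).getD role []).foldl pvInsertSorted st.2
        (st.1.insert role accum, accum)) (dB, l)).1 := by
  induction names generalizing dA dB s l with
  | nil => simpa using hd
  | cons r rs ih =>
    simp only [List.foldl_cons]
    apply ih
    · rw [hd, accum_step _ s l hs hl hm]
    · exact PySem.Set.nodup_union s _ hs
    · exact foldl_pvInsertSorted_pairwise _ l hl
    · intro y
      rw [foldl_pvInsertSorted_mem, PySem.Set.mem_union, PySem.Set.mem_ofList, hm]

-- ===== VERDICT (by name: the statement is the Claim_ definition above) =====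
theorem compile_permissions_py_spec : Claim_equal_compile_permissions_py := by
  intro role_perms role_names _
  unfold Spec_compile_permissions_py compile_permissions_py compile_permissions_py_alt
  rw [fold_eq role_perms role_names PySem.Dict.empty PySem.Dict.empty PySem.Set.empty []
    rfl (by simp [PySem.Set.empty]) List.Pairwise.nil (by simp [PySem.Set.empty])]
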